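-- pv_equiv track=rewrite | github.com/kuldeepsre/python_program | backtrack/subsutsumall.py | sum_of_subsets
-- ===== SOURCE A (Python) =====
-- def sum_of_subsets(arr, K):
--     n = len(arr)
--     res = [0]
--
--     def backtrack(start, k, subset_sum):
--         if k == K:
--             res[0] += subset_sum
--             return
--         for i in range(start, n):
--             backtrack(i + 1, k + 1, subset_sum + arr[i])
--
--     backtrack(0, 0, 0)
--     return res[0]
-- ===== SOURCE B (Python) =====
-- def sum_of_subsets(arr, K):
--     # closed form: each element appears in C(n-1, K-1) of the K-subsets
--     n = len(arr)
--     if K < 1 or K > n: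
--         return 0
--     c = 1  # c = C(n-1, i) after i iterations
--     for i in range(K - 1):
--         c = c * (n - 1 - i) // (i + 1)
--     return c * sum(arr)
-- ===== Notes on version B (the rewrite author's own statement) =====
-- stated objective: faster
-- what changed: Replaces the exponential backtracking enumeration of all K-subsets by the closed form C(n-1,K-1)*sum(arr) (each element occurs in C(n-1,K-1) subsets), with the binomial computed by a multiplicative loop.
import Mathlib
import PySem

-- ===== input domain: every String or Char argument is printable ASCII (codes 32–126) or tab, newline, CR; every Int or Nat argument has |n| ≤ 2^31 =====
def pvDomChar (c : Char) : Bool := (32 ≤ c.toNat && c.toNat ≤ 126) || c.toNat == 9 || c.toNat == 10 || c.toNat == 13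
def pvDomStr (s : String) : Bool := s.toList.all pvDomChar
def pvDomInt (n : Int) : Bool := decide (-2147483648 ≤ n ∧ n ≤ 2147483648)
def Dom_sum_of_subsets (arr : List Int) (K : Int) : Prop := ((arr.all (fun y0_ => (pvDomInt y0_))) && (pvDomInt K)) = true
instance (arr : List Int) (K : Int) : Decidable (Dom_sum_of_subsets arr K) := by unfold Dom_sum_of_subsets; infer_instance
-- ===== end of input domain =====

-- B replaces A's backtracking enumeration of all K-subsets by the closed form
-- C(n-1,K-1) * sum(arr); objective: faster.

-- ===== PORT A =====
-- backtrack(start,k,subset_sum) threading the accumulated res[0] as `acc`;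
-- fuel bounds the recursion depth (n - start strictly decreases, so n+1 fuel suffices).
def btkA (arr : List Int) (n : Nat) (K : Int) : Nat → Nat → Int → Int → Int → Int
  | 0, _, _, _, acc => acc
  | fuel+1, start, k, s, acc =>
    if k = K then acc + s
    else (List.range' start (n - start)).foldl
      (fun a i => btkA arr n K fuel (i+1) (k+1) (s + (PySem.List.pyGet? arr (i : Int)).getD 0) a) acc

def sum_of_subsets (arr : List Int) (K : Int) : Int :=
  btkA arr arr.length K (arr.length + 1) 0 0 0 0

-- ===== PORT B =====
def sum_of_subsets_alt (arr : List Int) (K : Int) : Int :=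
  let n := arr.length
  if K < 1 ∨ (n : Int) < K then 0
  else
    let c := (List.range (K - 1).toNat).foldl
      (fun c (i : Nat) => PySem.Int.floordiv (c * ((n : Int) - 1 - (i : Int))) ((i : Int) + 1)) 1
    c * arr.sum

-- ===== PRECONDITION & SPEC =====
def Spec_sum_of_subsets (arr : List Int) (K : Int) (out : Int) : Prop := out = sum_of_subsets_alt arr K
instance (arr : List Int) (K : Int) (out : Int) : Decidable (Spec_sum_of_subsets arr K out) := by unfold Spec_sum_of_subsets; infer_instance

-- ===== CLAIM (what is proved, stated in full; the proofs are below) =====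
def Claim_equal_sum_of_subsets : Prop := ∀ (arr : List Int) (K : Int), Dom_sum_of_subsets arr K → Spec_sum_of_subsets arr K (sum_of_subsets arr K)

-- ===== LEMMAS AND PROOFS =====

-- closed form of backtrack(start,k,s)'s total contribution:
-- C(m, K-k)*s + C(m-1, K-k-1)*(sum of arr from start), m = n - start
def Gf (arr : List Int) (K : Int) (start : Nat) (k s : Int) : Int :=
  if k = K then s
  else if K < k then 0
  else ((arr.length - start).choose (K - k).toNat : Int) * s
       + (((arr.length - start - 1).choose ((K - k).toNat - 1) : Int)) * (arr.drop start).sum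

lemma drop_eq_cons (arr : List Int) (start : Nat) (h : start < arr.length) :
    arr.drop start = ((PySem.List.pyGet? arr (start : Int)).getD 0) :: arr.drop (start + 1) := by
  rw [List.drop_eq_getElem_cons h]
  simp [PySem.List.pyGet?_natCast, List.getElem?_eq_getElem h]

lemma alt_loop_eq (n : Nat) (K : Int) (hKn : K ≤ (n : Int)) :
    ∀ t : Nat, (t : Int) ≤ K - 1 →
      (List.range t).foldl
        (fun c (i : Nat) => PySem.Int.floordiv (c * ((n : Int) - 1 - (i : Int))) ((i : Int) + 1)) 1
      = ((n - 1).choose t : Int) := by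
  intro t
  induction t with
  | zero => simp
  | succ t ih =>
    intro ht
    rw [List.range_succ, List.foldl_append, ih (by push_cast at ht ⊢; omega)]
    simp only [List.foldl_cons, List.foldl_nil]
    have h1 : ((n - 1).choose t : Int) * ((n : Int) - 1 - (t : Int))
        = ((n - 1).choose (t+1) : Int) * ((t : Int) + 1) := by
      have hn : 1 ≤ n := by omega
      have ht' : t ≤ n - 1 := by omega
      have := Nat.choose_succ_right_eq (n - 1) t
      have hcast : ((n : Int) - 1 - (t : Int)) = ((n - 1 - t : Nat) : Int) := by
        push_cast [Nat.cast_sub ht', Nat.cast_sub hn]; ring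
      rw [hcast]
      exact_mod_cast congrArg (Nat.cast : Nat → Int) this.symm
    rw [h1, PySem.Int.floordiv_eq_ediv_of_pos (by positivity), Int.mul_ediv_cancel _ (by positivity)]

lemma Gf_rec (arr : List Int) (K : Int) (start : Nat) (k s : Int)
    (h : start < arr.length) (hk : k ≠ K) :
    Gf arr K (start+1) (k+1) (s + (PySem.List.pyGet? arr (start : Int)).getD 0)
      + Gf arr K (start+1) k s = Gf arr K start k s := by
  have hd := drop_eq_cons arr start h
  set a := (PySem.List.pyGet? arr (start : Int)).getD 0 with ha
  have hT : (arr.drop start).sum = a + (arr.drop (start+1)).sum := by rw [hd]; simp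
  unfold Gf
  rcases lt_trichotomy k K with hkK | hkK | hkK
  · rcases eq_or_lt_of_le (by omega : k + 1 ≤ K) with h1 | h1
    · -- k + 1 = K
      rw [if_pos h1, if_neg hk, if_neg (by omega), if_neg hk, if_neg (by omega), hT,
        (by omega : (K - k).toNat = 1),
        (by omega : arr.length - start = (arr.length - (start+1)) + 1)]
      norm_num [Nat.choose_one_right]
      ring
    · -- k + 1 < K
      rw [if_neg (by omega), if_neg (by omega), if_neg hk, if_neg (by omega),
        if_neg hk, if_neg (by omega), hT]
      by_cases hsn : arr.length ≤ start + 1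
      · have hT0 : (arr.drop (start+1)).sum = 0 := by
          rw [List.drop_eq_nil_of_le hsn]; rfl
        rw [hT0, (by omega : arr.length - (start+1) = 0),
          (by omega : arr.length - start = 1)]
        rw [Nat.choose_eq_zero_of_lt (by omega : 0 < (K - (k+1)).toNat),
          Nat.choose_eq_zero_of_lt (by omega : 0 < (K - k).toNat),
          Nat.choose_eq_zero_of_lt (by omega : 1 < (K - k).toNat),
          Nat.choose_eq_zero_of_lt (by omega : (0:Nat) - 1 < (K - k).toNat - 1)]
        push_cast; ring
      · obtain ⟨m'', hm''⟩ : ∃ m'', arr.length - (start+1) = m'' + 1 := ⟨arr.length - start - 2, by omega⟩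
        obtain ⟨r', hr'⟩ : ∃ r', (K - k).toNat = r' + 2 := ⟨(K - k).toNat - 2, by omega⟩
        rw [hm'', hr', (by omega : arr.length - start = m'' + 2),
          (by omega : (K - (k+1)).toNat = r' + 1)]
        simp only [Nat.succ_sub_one]
        have e1 : (m''+2).choose (r'+2) = (m''+1).choose (r'+1) + (m''+1).choose (r'+2) :=
          Nat.choose_succ_succ (m''+1) (r'+1)
        have e2 : (m''+1).choose (r'+1) = m''.choose r' + m''.choose (r'+1) :=
          Nat.choose_succ_succ m'' r'
        have e3 : (m''+1).choose (r'+2) = m''.choose (r'+1) + m''.choose (r'+2) :=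
          Nat.choose_succ_succ m'' (r'+1)
        rw [e1, e2, e3]
        push_cast; ring
  · exact absurd hkK hk
  · rw [if_neg (by omega), if_pos (by omega : K < k + 1), if_neg hk, if_pos hkK,
      if_neg hk, if_pos hkK]
    ring

lemma btk_eq (arr : List Int) (K : Int) :
    ∀ (m fuel start : Nat) (k s acc : Int), arr.length - start = m → m ≤ fuel →
      btkA arr arr.length K (fuel+1) start k s acc = acc + Gf arr K start k s := by
  intro m
  induction m with
  | zero =>
    intro fuel start k s acc hm _
    simp only [btkA, hm, List.range'_zero, List.foldl_nil]
    by_cases hk : k = K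
    · rw [if_pos hk, Gf, if_pos hk]
    · rw [if_neg hk, Gf, if_neg hk]
      by_cases hK : K < k
      · rw [if_pos hK]; ring
      · rw [if_neg hK, hm, Nat.choose_eq_zero_of_lt (show 0 < (K-k).toNat by omega),
          List.drop_eq_nil_of_le (show arr.length ≤ start by omega)]
        simp
  | succ m ih =>
    intro fuel start k s acc hm hf
    obtain ⟨f, rfl⟩ : ∃ f, fuel = f + 1 := ⟨fuel - 1, by omega⟩
    by_cases hk : k = K
    · simp only [btkA, if_pos hk, Gf]
    · have hlt : start < arr.length := by omega
      have hrest : ∀ X : Int,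
          List.foldl (fun a i => btkA arr arr.length K (f+1) (i+1) (k+1)
              (s + (PySem.List.pyGet? arr (i:Int)).getD 0) a) X (List.range' (start+1) m)
          = btkA arr arr.length K (f+1+1) (start+1) k s X := by
        intro X
        simp only [btkA, if_neg hk, (show arr.length - (start+1) = m by omega)]
      have hstep : btkA arr arr.length K (f+1+1) start k s acc
          = List.foldl (fun a i => btkA arr arr.length K (f+1) (i+1) (k+1)
              (s + (PySem.List.pyGet? arr (i:Int)).getD 0) a) acc (List.range' start (m+1)) := by
        simp only [btkA, if_neg hk, hm]
      rw [hstep, List.range'_succ, List.foldl_cons,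
        ih f (start+1) (k+1) _ acc (by omega) (by omega), hrest,
        ih (f+1) (start+1) k s _ (by omega) (by omega)]
      rw [add_assoc, Gf_rec arr K start k s hlt hk]

lemma sum_eq_alt (arr : List Int) (K : Int) : sum_of_subsets arr K = sum_of_subsets_alt arr K := by
  rw [sum_of_subsets, btk_eq arr K arr.length arr.length 0 0 0 0 (by omega) (by omega),
    zero_add]
  rw [Gf, sum_of_subsets_alt]
  by_cases h0 : K = 0
  · simp [h0]
  by_cases hneg : K < 0
  · rw [if_neg (by omega), if_pos (by omega), if_pos (by omega : K < 1 ∨ (arr.length:Int) < K)]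
  · have hK1 : 1 ≤ K := by omega
    rw [if_neg (by omega), if_neg (by omega)]
    simp only [Nat.sub_zero, Int.sub_zero, List.drop_zero]
    by_cases hbig : (arr.length : Int) < K
    · rw [if_pos (Or.inr hbig)]
      rcases Nat.eq_zero_or_pos arr.length with hn | hn
      · have : arr = [] := List.length_eq_zero_iff.mp hn
        subst this; simp
      · rw [Nat.choose_eq_zero_of_lt (show arr.length - 1 < K.toNat - 1 by omega)]
        simp
    · rw [if_neg (by omega : ¬ (K < 1 ∨ (arr.length:Int) < K))]
      rw [alt_loop_eq arr.length K (by omega) (K-1).toNat (by omega),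
        (show (K-1).toNat = K.toNat - 1 by omega)]
      simp

-- ===== VERDICT (by name: the statement is the Claim_ definition above) =====
theorem sum_of_subsets_spec : Claim_equal_sum_of_subsets := by
  intro arr K _
  unfold Spec_sum_of_subsets
  exact sum_eq_alt arr K
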